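-- pv_equiv track=rewrite | github.com/py-LIJI/null_model | unweighted/null_model_community.py | dict_degree_nodes
-- ===== SOURCE A (Python) =====
-- def dict_degree_nodes(degree_node_list):
--     # 返回的字典为{度：[节点1，节点2，..]}，其中节点1和节点2有相同的度
--     D = {}
--     for degree_node_i in degree_node_list:
--         if degree_node_i[0] not in D:
--             D[degree_node_i[0]] = [degree_node_i[1]]
--         else:
--             D[degree_node_i[0]].append(degree_node_i[1])
--     return D
-- ===== SOURCE B (Python) =====
-- def dict_degree_nodes(degree_node_list):
--     # Two-pass: collect distinct degrees in first-occurrence order, then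
--     # build each group with one filtering comprehension over the whole list.
--     degrees = dict.fromkeys(d for d, _ in degree_node_list)
--     return {d: [n for dd, n in degree_node_list if dd == d] for d in degrees}
-- ===== Notes on version B (the rewrite author's own statement) =====
-- stated objective: alternative
-- what changed: Replaces the single-pass dict accumulation (insert-or-append per element) with a two-pass decomposition: first dedup the degree keys in first-occurrence order, then build each group by a filtering comprehension over the input.
import Mathlib
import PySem

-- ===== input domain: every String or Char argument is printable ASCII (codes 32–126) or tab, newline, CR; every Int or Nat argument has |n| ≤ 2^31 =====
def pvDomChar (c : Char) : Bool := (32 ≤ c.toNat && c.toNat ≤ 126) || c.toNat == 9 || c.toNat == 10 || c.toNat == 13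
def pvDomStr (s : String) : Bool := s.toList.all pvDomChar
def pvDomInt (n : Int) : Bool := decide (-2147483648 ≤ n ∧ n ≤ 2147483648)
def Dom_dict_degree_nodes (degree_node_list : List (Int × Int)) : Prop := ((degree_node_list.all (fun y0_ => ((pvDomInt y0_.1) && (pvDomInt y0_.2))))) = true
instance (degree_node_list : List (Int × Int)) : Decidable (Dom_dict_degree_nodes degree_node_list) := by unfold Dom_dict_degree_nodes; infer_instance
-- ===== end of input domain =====

-- ===== PORT A =====
-- A: single pass; per pair, insert a fresh [node] or append to the existing group.
def dict_degree_nodes (degree_node_list : List (Int × Int)) : List (Int × List Int) :=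
  (degree_node_list.foldl
    (fun D p =>
      if D.contains p.1 then D.modify p.1 [] (· ++ [p.2])
      else D.insert p.1 [p.2])
    PySem.Dict.empty).items

-- ===== PORT B =====
-- B: dedup the degrees (dict.fromkeys order), then one filtering comprehension per degree.
def dict_degree_nodes_alt (degree_node_list : List (Int × Int)) : List (Int × List Int) :=
  (PySem.List.dedup (degree_node_list.map (·.1))).map
    (fun d => (d, (degree_node_list.filter (fun p => p.1 == d)).map (·.2)))

-- ===== PRECONDITION & SPEC =====
def Spec_dict_degree_nodes (degree_node_list : List (Int × Int)) (out : List (Int × List Int)) : Prop := out = dict_degree_nodes_alt degree_node_list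
instance (degree_node_list : List (Int × Int)) (out : List (Int × List Int)) : Decidable (Spec_dict_degree_nodes degree_node_list out) := by unfold Spec_dict_degree_nodes; infer_instance

-- ===== CLAIM (what is proved, stated in full; the proofs are below) =====
def Claim_equal_dict_degree_nodes : Prop := ∀ (degree_node_list : List (Int × Int)), Dom_dict_degree_nodes degree_node_list → Spec_dict_degree_nodes degree_node_list (dict_degree_nodes degree_node_list)

-- ===== LEMMAS AND PROOFS =====

-- ===== VERDICT (by name: the statement is the Claim_ definition above) =====
-- The branch in A's loop body is exactly Dict.modify in both cases.
theorem step_eq_modify (d : PySem.Dict Int (List Int)) (p : Int × Int) :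
    (if d.contains p.1 then d.modify p.1 [] (· ++ [p.2]) else d.insert p.1 [p.2])
      = d.modify p.1 [] (· ++ [p.2]) := by
  by_cases h : d.contains p.1
  · simp [h]
  · simp only [Bool.not_eq_true] at h
    simp [h, PySem.Dict.modify, PySem.Dict.insert, PySem.Dict.getD_of_not_contains]

theorem dict_degree_nodes_spec : Claim_equal_dict_degree_nodes := by
  intro l _
  unfold Spec_dict_degree_nodes dict_degree_nodes dict_degree_nodes_alt
  have hfold :
      l.foldl (fun D p => if D.contains p.1 then D.modify p.1 [] (· ++ [p.2])
                          else D.insert p.1 [p.2]) PySem.Dict.empty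
        = l.foldl (fun D p => D.modify p.1 [] (· ++ [p.2])) PySem.Dict.empty := by
    congr 1
    funext D p
    exact step_eq_modify D p
  rw [hfold]
  set Dend := l.foldl (fun D p => D.modify p.1 [] (· ++ [p.2])) PySem.Dict.empty with hD
  have hnd : Dend.keys.Nodup := by
    rw [hD]
    exact PySem.Dict.nodup_keys_foldl_modify_key l (·.1) [] (fun D p => (· ++ [p.2]))
      PySem.Dict.empty PySem.Dict.nodup_keys_empty
  have hkeys : Dend.keys = PySem.List.dedup (l.map (·.1)) := by
    rw [hD]
    rw [PySem.Dict.keys_foldl_modify_key]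
    simp [PySem.Dict.keys_empty, PySem.Set.update, PySem.Set.ofList_eq_foldl]
  have hitems := PySem.Dict.items_eq_map_keys Dend hnd ([] : List Int)
  rw [hitems, hkeys]
  apply List.map_congr_left
  intro d _
  have := PySem.Dict.getD_foldl_modify_append (d := PySem.Dict.empty) (l := l) (c := d)
  simp only [PySem.Dict.getD_empty] at this
  rw [hD]
  simp [this]
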